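-- pv_equiv track=rewrite | github.com/j-benson/advent-of-code | 2019/day_4/star_2.py | contains_adjacent
-- ===== SOURCE A (Python) =====
-- def contains_adjacent(password):
--   value = str(password)
--   matches = 0
--   for i in range(1, len(value)):
--     if value[i-1] == value[i]:
--       matches += 1
--     else:
--       if matches > 0 and matches % 2 == 0:
--         return False
--       matches = 0
--   if matches > 0 and matches % 2 == 0:
--     return False
--   return True
-- ===== SOURCE B (Python) =====
-- def contains_adjacent(password):
--   s = str(password)
--   prev = None
--   i = 0
--   n = len(s)
--   while i < n:
--     if i + 1 < n and s[i] == s[i + 1]: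
--       prev = s[i]
--       i += 2
--     else:
--       if s[i] == prev:
--         return False
--       prev = s[i]
--       i += 1
--   return True
-- ===== Notes on version B (the rewrite author's own statement) =====
-- stated objective: alternative
-- what changed: Replaces A's per-character run-length counter with a parity test by a greedy stride-2 two-pointer scan: equal adjacent characters are consumed in pairs, and a lone character is rejected exactly when it equals the previously consumed character, so forbidden odd-length runs are detected without any counting.
import Mathlib
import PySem

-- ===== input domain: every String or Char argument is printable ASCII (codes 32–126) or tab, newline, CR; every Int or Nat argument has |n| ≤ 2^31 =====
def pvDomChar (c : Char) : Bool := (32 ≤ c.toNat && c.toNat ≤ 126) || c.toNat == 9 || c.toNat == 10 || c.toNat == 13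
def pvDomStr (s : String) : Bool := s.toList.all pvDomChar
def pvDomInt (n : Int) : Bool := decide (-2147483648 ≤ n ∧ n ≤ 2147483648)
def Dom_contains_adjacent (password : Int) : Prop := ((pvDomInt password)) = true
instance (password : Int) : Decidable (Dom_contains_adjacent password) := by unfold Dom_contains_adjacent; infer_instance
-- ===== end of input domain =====

-- B replaces A's run-length parity counter with a greedy stride-2 scan (pairs consumed, lone char rejected iff it equals the previous char); same values, different mechanism.
-- ===== PORT A =====
-- A's loop 'for i in range(1,len(value))' compares value[i-1] with value[i]; ported as
-- structural recursion carrying the previous character and the running 'matches' counter.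
def pvLoopA (prev : Char) (pm : Int) : List Char → Bool
  | [] => !(pm > 0 && pm % 2 == 0)
  | c :: cs =>
      if prev == c then pvLoopA c (pm + 1) cs
      else if pm > 0 && pm % 2 == 0 then false
      else pvLoopA c 0 cs

def contains_adjacent (password : Int) : Bool :=
  match (PySem.Int.toStr password).toList with
  | [] => true
  | c :: cs => pvLoopA c 0 cs

-- ===== PORT B =====
-- Source B's while loop over index i with 'prev' (None at the start): the index tests
-- 'i < n' / 'i+1 < n and s[i]==s[i+1]' become the three list patterns below.
def pvLoopB (prev : Option Char) : List Char → Bool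
  | [] => true
  | [c] => if some c == prev then false else true
  | c :: d :: rest =>
      if c == d then pvLoopB (some c) rest
      else if some c == prev then false
      else pvLoopB (some c) (d :: rest)

def contains_adjacent_alt (password : Int) : Bool :=
  pvLoopB none (PySem.Int.toStr password).toList

-- ===== PRECONDITION & SPEC =====
def Spec_contains_adjacent (password : Int) (out : Bool) : Prop := out = contains_adjacent_alt password
instance (password : Int) (out : Bool) : Decidable (Spec_contains_adjacent password out) := by unfold Spec_contains_adjacent; infer_instance

-- ===== CLAIM (what is proved, stated in full; the proofs are below) =====
def Claim_equal_contains_adjacent : Prop := ∀ (password : Int), Dom_contains_adjacent password → Spec_contains_adjacent password (contains_adjacent password)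

-- ===== LEMMAS AND PROOFS =====
-- Proof-side helpers: the maximal run lengths of a list; both ports are shown
-- equal to 'every run length is 1 or even'.
def pvGo (c : Char) (n : Nat) : List Char → List Nat
  | [] => [n]
  | d :: ds => if c == d then pvGo c (n + 1) ds else n :: pvGo d 1 ds

theorem pvLoop_eq_go (rest : List Char) : ∀ (prev : Char) (k : Nat),
    pvLoopA prev (k : Int) rest = (pvGo prev (k + 1) rest).all (fun L => L == 1 || L % 2 == 0) := by
  induction rest with
  | nil =>
      intro prev k
      simp only [pvLoopA, pvGo, List.all_cons, List.all_nil, Bool.and_true]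
      rw [Bool.eq_iff_iff]
      simp
      omega
  | cons d ds ih =>
      intro prev k
      by_cases h : prev == d
      · have hpd : prev = d := by simpa using h
        have hL : pvLoopA prev (k : Int) (d :: ds) = pvLoopA d ((k : Int) + 1) ds := by
          simp [pvLoopA, h]
        have hR : pvGo prev (k + 1) (d :: ds) = pvGo d (k + 1 + 1) ds := by
          simp [pvGo, hpd]
        rw [hL, hR]
        have := ih d (k + 1)
        simpa [Nat.cast_add] using this
      · have hL : pvLoopA prev (k : Int) (d :: ds)
            = (if (k : Int) > 0 && (k : Int) % 2 == 0 then false else pvLoopA d 0 ds) := by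
          simp [pvLoopA, h]
        have hR : pvGo prev (k + 1) (d :: ds) = (k + 1) :: pvGo d 1 ds := by
          simp [pvGo, h]
        rw [hL, hR]
        simp only [List.all_cons]
        by_cases hc : ((k : Int) > 0 && (k : Int) % 2 == 0) = true
        · rw [if_pos hc]
          have hp : (k + 1 == 1 || (k + 1) % 2 == 0) = false := by
            simp at hc ⊢
            omega
          rw [hp, Bool.false_and]
        · rw [if_neg hc]
          have hp : (k + 1 == 1 || (k + 1) % 2 == 0) = true := by
            simp at hc ⊢
            omega
          rw [hp, Bool.true_and]
          simpa using ih d 0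

-- B-side invariant, proved for both loop states at once (run start with p ≠ c;
-- an even number m of c's already consumed) by strong induction on the length.
theorem pvLoopB_both : ∀ (n : Nat) (cs : List Char) (c : Char), cs.length ≤ n →
    ((∀ p : Option Char, (∀ e, p = some e → e ≠ c) →
        pvLoopB p (c :: cs) = (pvGo c 1 cs).all (fun L => L == 1 || L % 2 == 0))
     ∧ (∀ m : Nat, 2 ≤ m → m % 2 = 0 →
        pvLoopB (some c) cs = (pvGo c m cs).all (fun L => L == 1 || L % 2 == 0))) := by
  intro n
  induction n with
  | zero =>
      intro cs c hlen
      have hnil : cs = [] := List.length_eq_zero_iff.mp (Nat.le_zero.mp hlen)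
      subst hnil
      constructor
      · intro p hp
        cases p with
        | none => simp [pvLoopB, pvGo]
        | some e =>
            have : e ≠ c := hp e rfl
            simp [pvLoopB, pvGo, Ne.symm this]
      · intro m hm2 hme
        simp [pvLoopB, pvGo]
        omega
  | succ n ih =>
      intro cs c hlen
      cases cs with
      | nil =>
          constructor
          · intro p hp
            cases p with
            | none => simp [pvLoopB, pvGo]
            | some e =>
                have : e ≠ c := hp e rfl
                simp [pvLoopB, pvGo, Ne.symm this]
          · intro m hm2 hme
            simp [pvLoopB, pvGo]
            omega
      | cons d ds =>
          have hds : ds.length ≤ n := by simpa using Nat.le_of_succ_le_succ hlen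
          constructor
          · -- run-start state: list is c :: d :: ds
            intro p hp
            by_cases hcd : c = d
            · subst hcd
              have hB : pvLoopB p (c :: c :: ds) = pvLoopB (some c) ds := by
                simp [pvLoopB]
              have hG : pvGo c 1 (c :: ds) = pvGo c 2 ds := by simp [pvGo]
              rw [hB, hG]
              exact (ih ds c hds).2 2 (by omega) (by omega)
            · have hpc : (some c == p) = false := by
                cases p with
                | none => simp
                | some e =>
                    have : e ≠ c := hp e rfl
                    simp [Ne.symm this]
              have hB : pvLoopB p (c :: d :: ds) = pvLoopB (some c) (d :: ds) := by
                simp [pvLoopB, hcd, hpc]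
              have hG : pvGo c 1 (d :: ds) = 1 :: pvGo d 1 ds := by simp [pvGo, hcd]
              rw [hB, hG]
              simp only [List.all_cons]
              have h1 : ((1 : Nat) == 1 || 1 % 2 == 0) = true := by decide
              rw [h1, Bool.true_and]
              exact (ih ds d hds).1 (some c) (by intro e he; cases he; exact hcd)
          · -- even state: m c's consumed, list is d :: ds
            intro m hm2 hme
            by_cases hcd : c = d
            · subst hcd
              cases ds with
              | nil =>
                  have hB : pvLoopB (some c) [c] = false := by simp [pvLoopB]
                  have hG : pvGo c m [c] = [m + 1] := by simp [pvGo]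
                  rw [hB, hG]
                  simp
                  omega
              | cons e es =>
                  by_cases hce : c = e
                  · subst hce
                    have hB : pvLoopB (some c) (c :: c :: es) = pvLoopB (some c) es := by
                      simp [pvLoopB]
                    have hG : pvGo c m (c :: c :: es) = pvGo c (m + 2) es := by
                      simp [pvGo]
                    rw [hB, hG]
                    have hes : es.length ≤ n := by
                      simp at hlen; omega
                    exact (ih es c hes).2 (m + 2) (by omega) (by omega)
                  · have hB : pvLoopB (some c) (c :: e :: es) = false := by
                      simp [pvLoopB, hce]
                    have hG : pvGo c m (c :: e :: es) = (m + 1) :: pvGo e 1 es := by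
                      simp [pvGo, hce]
                    rw [hB, hG]
                    simp only [List.all_cons]
                    have : ((m + 1 : Nat) == 1 || (m + 1) % 2 == 0) = false := by
                      simp
                      omega
                    rw [this, Bool.false_and]
            · -- d starts a new run
              have hG : pvGo c m (d :: ds) = m :: pvGo d 1 ds := by simp [pvGo, hcd]
              have hpredm : ((m : Nat) == 1 || m % 2 == 0) = true := by
                simp
                omega
              have hB : pvLoopB (some c) (d :: ds) = pvLoopB (some c) (d :: ds) := rfl
              rw [hG]
              simp only [List.all_cons, hpredm, Bool.true_and]
              have hR := (ih ds d hds).1 (some c) (by intro e he; cases he; exact hcd)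
              exact hR

-- ===== VERDICT (by name: the statement is the Claim_ definition above) =====
theorem contains_adjacent_spec : Claim_equal_contains_adjacent := by
  intro password _
  unfold Spec_contains_adjacent contains_adjacent contains_adjacent_alt
  cases h : (PySem.Int.toStr password).toList with
  | nil => simp [pvLoopB]
  | cons c cs =>
      have hA := pvLoop_eq_go cs c 0
      have hB := (pvLoopB_both cs.length cs c le_rfl).1 none (by intro e he; cases he)
      simp at hA
      show pvLoopA c 0 cs = pvLoopB none (c :: cs)
      rw [hA, ← hB]
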